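-- pv_equiv track=rewrite | github.com/francosalvucci14/Esercizi_ASD | Esami/Esercitazioni/Esercitazione4.py | Algoritmo
-- ===== SOURCE A (Python) =====
-- def Algoritmo(a):
--     n=len(a)
--     Z = [0]*n
--     U = [0]*n
--
--     if a[0]==0:
--         Z[0] = 1
--     else:
--         U[0] = 1
--
--     for j in range(1,n):
--         if a[j] == 0:
--             Z[j] = Z[j-1]+1
--         else:
--             Z[j] = Z[j-1]
--
--     U[n-1] = 0
--
--     for j in range(n-2,-1,-1):
--         U[j] = U[j+1]+a[j+1]
--
--     for i in range(n):
--         if Z[i] == U[i]: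
--             return i+1
--     return 0
-- ===== SOURCE B (Python) =====
-- def Algoritmo(a):
--     total = sum(a)
--     zeros = 0
--     seen = 0
--     for i, x in enumerate(a):
--         if x == 0:
--             zeros += 1
--         seen += x
--         if zeros == total - seen:
--             return i + 1
--     return 0
-- ===== Notes on version B (the rewrite author's own statement) =====
-- stated objective: simpler
-- what changed: B replaces A's two precomputed length-n tables (prefix zero-counts Z and suffix sums U) plus a third scanning loop with a single forward pass keeping two scalar accumulators (zeros seen and running sum), obtaining the suffix quantity as total minus the running sum.
-- crash fix: On the empty list A raises IndexError (it indexes the first element); B's single loop never fires and it returns zero. — e.g. on Algoritmo([]): A raises IndexError, B returns 0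
import Mathlib
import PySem

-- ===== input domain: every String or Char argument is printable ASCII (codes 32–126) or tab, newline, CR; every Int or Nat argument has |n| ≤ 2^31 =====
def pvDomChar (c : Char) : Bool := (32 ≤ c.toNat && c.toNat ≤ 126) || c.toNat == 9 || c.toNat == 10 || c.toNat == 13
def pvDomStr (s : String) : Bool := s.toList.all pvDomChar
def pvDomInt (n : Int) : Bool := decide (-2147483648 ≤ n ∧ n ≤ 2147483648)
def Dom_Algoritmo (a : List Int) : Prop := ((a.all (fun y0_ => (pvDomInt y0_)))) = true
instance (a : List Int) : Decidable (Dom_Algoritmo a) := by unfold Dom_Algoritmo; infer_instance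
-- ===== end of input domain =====

-- B drops A's two precomputed tables (prefix zero-counts Z, suffix sums U) and A's third
-- scanning loop, doing one forward pass with two scalar accumulators (objective: simpler).

-- ===== PORT A =====
def pvZStep (a : List Int) (Z : List Int) (j : Int) : List Int :=
  if PySem.List.pyGetD a j 0 = 0 then Z.set j.toNat (Z.getD (j-1).toNat 0 + 1)
  else Z.set j.toNat (Z.getD (j-1).toNat 0)

def pvUStep (a : List Int) (U : List Int) (j : Int) : List Int :=
  U.set j.toNat (U.getD (j+1).toNat 0 + PySem.List.pyGetD a (j+1) 0)

def pvAScan (Z U : List Int) : List Int → Int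
  | [] => 0
  | i :: rest =>
    if Z.getD i.toNat 0 = U.getD i.toNat 0 then i + 1 else pvAScan Z U rest

def Algoritmo (a : List Int) : Int :=
  let n : Int := a.length
  let Z : List Int := List.replicate a.length 0
  let U : List Int := List.replicate a.length 0
  -- 'if a[0]==0: Z[0]=1 else: U[0]=1'; indexing an empty list raises IndexError (excluded by Pre_)
  let ZU : List Int × List Int :=
    match PySem.List.pyGet? a 0 with
    | some v => if v = 0 then (Z.set 0 1, U) else (Z, U.set 0 1)
    | none => (Z, U)
  let Z := (PySem.List.pyRange 1 n 1).foldl (pvZStep a) ZU.1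
  let U := ZU.2.set (a.length - 1) 0
  let U := (PySem.List.pyRange (n-2) (-1) (-1)).foldl (pvUStep a) U
  pvAScan Z U (PySem.List.pyRange 0 n 1)

-- ===== PORT B =====
def pvBLoop (total : Int) : List Int → Int → Int → Int → Int
  | [], _, _, _ => 0
  | x :: rest, i, zeros, seen =>
    let zeros := if x = 0 then zeros + 1 else zeros
    let seen := seen + x
    if zeros = total - seen then i + 1 else pvBLoop total rest (i + 1) zeros seen

def Algoritmo_alt (a : List Int) : Int := pvBLoop a.sum a 0 0 0

-- ===== PRECONDITION & SPEC =====
-- Pre_ excludes exactly the empty list, on which A raises IndexError indexing the first element.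
def Pre_Algoritmo (a : List Int) : Prop := a ≠ []
instance (a : List Int) : Decidable (Pre_Algoritmo a) := by unfold Pre_Algoritmo; infer_instance
def pvWitness_Algoritmo : List Int := ([1, 0, 1])

-- On the empty list A raises IndexError (it indexes the first element); B's single loop never fires and it returns zero.
def Raises_Algoritmo (a : List Int) : Prop := a = []
instance (a : List Int) : Decidable (Raises_Algoritmo a) := by unfold Raises_Algoritmo; infer_instance
def pvRaiseWitness_Algoritmo : List Int := ([])
def pvRaiseWitnessOut_Algoritmo : Int := 0

def Spec_Algoritmo (a : List Int) (out : Int) : Prop := out = Algoritmo_alt a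
instance (a : List Int) (out : Int) : Decidable (Spec_Algoritmo a out) := by unfold Spec_Algoritmo; infer_instance

-- ===== CLAIM (what is proved, stated in full; the proofs are below) =====
def Claim_equal_Algoritmo : Prop := ∀ (a : List Int), Dom_Algoritmo a → Pre_Algoritmo a → Spec_Algoritmo a (Algoritmo a)
def Claim_raises_Algoritmo : Prop := (∀ (a : List Int), Dom_Algoritmo a → Raises_Algoritmo a → ¬ Pre_Algoritmo a) ∧ (Dom_Algoritmo (pvRaiseWitness_Algoritmo) ∧ Raises_Algoritmo (pvRaiseWitness_Algoritmo) ∧ Algoritmo_alt (pvRaiseWitness_Algoritmo) = pvRaiseWitnessOut_Algoritmo)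

-- ===== LEMMAS AND PROOFS =====

def pvZC (l : List Int) : Int := (l.countP (fun x => decide (x = 0)) : Nat)

theorem pv_getD_set_self (l : List Int) (i : Nat) (x d : Int) (h : i < l.length) :
    (l.set i x).getD i d = x := by
  simp [List.getD_eq_getElem?_getD, List.getElem?_set, h]

theorem pv_getD_set_ne (l : List Int) (i j : Nat) (x d : Int) (h : i ≠ j) :
    (l.set i x).getD j d = l.getD j d := by
  simp [List.getD_eq_getElem?_getD, List.getElem?_set, h]

theorem pv_zc_take_succ (a : List Int) (m : Nat) (h : m < a.length) :
    pvZC (a.take (m+1)) = pvZC (a.take m) + (if a[m] = 0 then 1 else 0) := by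
  rw [List.take_add_one, List.getElem?_eq_getElem h]
  simp only [pvZC, Option.toList_some, List.countP_append, List.countP_singleton]
  by_cases hx : a[m] = 0 <;> simp [hx]

theorem pv_sum_drop_succ (a : List Int) (m : Nat) (h : m < a.length) :
    (a.drop m).sum = a[m] + (a.drop (m+1)).sum := by
  conv_lhs => rw [List.drop_eq_getElem_cons h]
  rw [List.sum_cons]

theorem pv_sum_split (a : List Int) (m : Nat) :
    a.sum = (a.take m).sum + (a.drop m).sum := by
  conv_lhs => rw [← List.take_append_drop m a]
  simp

theorem pv_Z_char (a Z0 : List Int) (hlen : Z0.length = a.length)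
    (h0 : Z0.getD 0 0 = pvZC (a.take 1)) :
    ∀ m : Nat, 1 ≤ m → m ≤ a.length →
      ((PySem.List.pyRange 1 (m:Int) 1).foldl (pvZStep a) Z0).length = a.length ∧
      ∀ i : Nat, i < m →
        ((PySem.List.pyRange 1 (m:Int) 1).foldl (pvZStep a) Z0).getD i 0 = pvZC (a.take (i+1)) := by
  intro m hm1
  induction m, hm1 using Nat.le_induction with
  | base =>
    intro _
    rw [PySem.List.pyRange_one_eq_nil (by norm_num)]
    refine ⟨hlen, ?_⟩
    intro i hi
    interval_cases i
    simpa using h0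
  | succ m hm ih =>
    intro hmn
    have hmn' : m ≤ a.length := by omega
    obtain ⟨ihlen, ihgd⟩ := ih hmn'
    have hsplit : PySem.List.pyRange 1 ((m+1 : Nat) : Int) 1
        = PySem.List.pyRange 1 (m:Int) 1 ++ [(m:Int)] := by
      have : ((m+1 : Nat) : Int) = (m : Int) + 1 := by push_cast; ring
      rw [this, PySem.List.pyRange_one_succ_right (by exact_mod_cast hm)]
    rw [hsplit, List.foldl_append]
    simp only [List.foldl_cons, List.foldl_nil]
    set L := (PySem.List.pyRange 1 (m:Int) 1).foldl (pvZStep a) Z0 with hL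
    have hmlt : m < a.length := by omega
    have hget : PySem.List.pyGetD a (m:Int) 0 = a[m] := by
      rw [PySem.List.pyGetD_natCast]
      simp [List.getD_eq_getElem?_getD, List.getElem?_eq_getElem hmlt]
    have htn : ((m:Int)).toNat = m := by omega
    have htn1 : ((m:Int) - 1).toNat = m - 1 := by omega
    have hprev : L.getD (m-1) 0 = pvZC (a.take m) := by
      have := ihgd (m-1) (by omega)
      have hms : m - 1 + 1 = m := by omega
      rwa [hms] at this
    have hval : pvZStep a L (m:Int) = L.set m (pvZC (a.take (m+1))) := by
      rw [pvZStep, hget, htn, htn1, hprev, pv_zc_take_succ a m hmlt]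
      by_cases hx : a[m] = 0 <;> simp [hx]
    rw [hval]
    refine ⟨by simpa using ihlen, ?_⟩
    intro i hi
    by_cases hone : i = m
    · subst hone
      rw [pv_getD_set_self _ _ _ _ (by omega)]
    · rw [pv_getD_set_ne _ _ _ _ _ (by omega)]
      exact ihgd i (by omega)

theorem pv_U_char (a : List Int) :
    ∀ k : Nat, k + 2 ≤ a.length → ∀ U : List Int, U.length = a.length →
      (∀ i : Nat, k < i → i < a.length → U.getD i 0 = (a.drop (i+1)).sum) →
      ((PySem.List.pyRange (k:Int) (-1) (-1)).foldl (pvUStep a) U).length = a.length ∧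
      ∀ i : Nat, i < a.length →
        ((PySem.List.pyRange (k:Int) (-1) (-1)).foldl (pvUStep a) U).getD i 0 = (a.drop (i+1)).sum := by
  intro k
  induction k with
  | zero =>
    intro hk U hlen hinv
    simp only [Nat.cast_zero]
    rw [PySem.List.pyRange_neg_one_cons (by norm_num)]
    simp only [List.foldl_cons]
    rw [show (0:Int) - 1 = -1 by ring, PySem.List.pyRange_neg_one_eq_nil (by norm_num)]
    simp only [List.foldl_nil]
    have h1 : (1:Nat) < a.length := by omega
    have hget : PySem.List.pyGetD a ((0:Int)+1) 0 = a[1] := by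
      rw [show ((0:Int)+1) = ((1:Nat):Int) by norm_num, PySem.List.pyGetD_natCast]
      simp [List.getD_eq_getElem?_getD, List.getElem?_eq_getElem h1]
    have hU1 : U.getD ((0:Int)+1).toNat 0 = (a.drop 2).sum := by
      rw [show ((0:Int)+1).toNat = 1 by norm_num]
      exact hinv 1 (by omega) h1
    have hval : pvUStep a U 0 = U.set 0 ((a.drop 1).sum) := by
      rw [pvUStep, hU1, hget, pv_sum_drop_succ a 1 h1]
      norm_num [add_comm]
    rw [hval]
    refine ⟨by simpa using hlen, ?_⟩
    intro i hi
    by_cases h0 : i = 0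
    · subst h0; rw [pv_getD_set_self _ _ _ _ (by omega)]
    · rw [pv_getD_set_ne _ _ _ _ _ (by omega)]
      exact hinv i (by omega) hi
  | succ k ih =>
    intro hk U hlen hinv
    rw [PySem.List.pyRange_neg_one_cons (by push_cast; omega : (-1:Int) < ((k+1:Nat):Int))]
    simp only [List.foldl_cons]
    have hcast : ((k+1:Nat):Int) - 1 = (k:Int) := by push_cast; ring
    have hk2 : k + 2 < a.length := by omega
    have hget : PySem.List.pyGetD a (((k+1:Nat):Int)+1) 0 = a[k+2] := by
      rw [show (((k+1:Nat):Int)+1) = ((k+2:Nat):Int) by push_cast; ring, PySem.List.pyGetD_natCast]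
      simp [List.getD_eq_getElem?_getD, List.getElem?_eq_getElem hk2]
    have hU2 : U.getD (((k+1:Nat):Int)+1).toNat 0 = (a.drop (k+3)).sum := by
      rw [show (((k+1:Nat):Int)+1).toNat = k+2 by omega]
      exact hinv (k+2) (by omega) hk2
    have hval : pvUStep a U ((k+1:Nat):Int) = U.set (k+1) ((a.drop (k+2)).sum) := by
      rw [pvUStep, hU2, hget, show (((k+1:Nat):Int)).toNat = k+1 by omega,
        pv_sum_drop_succ a (k+2) hk2]
      simp [Int.add_comm]
    rw [hval, hcast]
    apply ih (by omega)
    · simpa using hlen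
    · intro i hik hi
      by_cases hone : i = k+1
      · subst hone
        rw [pv_getD_set_self _ _ _ _ (by omega)]
      · rw [pv_getD_set_ne _ _ _ _ _ (by omega)]
        exact hinv i (by omega) hi

theorem pv_zc_take_succ' (a : List Int) (m : Nat) (h : m < a.length) :
    pvZC (a.take (m+1)) = if a[m] = 0 then pvZC (a.take m) + 1 else pvZC (a.take m) := by
  rw [pv_zc_take_succ a m h]
  by_cases hx : a[m] = 0 <;> simp [hx]

theorem pv_scan_eq (a Z U : List Int)
    (hZ : ∀ i : Nat, i < a.length → Z.getD i 0 = pvZC (a.take (i+1)))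
    (hU : ∀ i : Nat, i < a.length → U.getD i 0 = (a.drop (i+1)).sum) :
    ∀ (d k : Nat), a.length - k = d → k ≤ a.length →
      pvAScan Z U (PySem.List.pyRange (k:Int) (a.length:Int) 1) =
      pvBLoop a.sum (a.drop k) (k:Int) (pvZC (a.take k)) ((a.take k).sum) := by
  intro d
  induction d with
  | zero =>
    intro k hd hk
    have hk' : k = a.length := by omega
    subst hk'
    rw [PySem.List.pyRange_one_eq_nil (by omega), List.drop_length]
    rfl
  | succ d ih =>
    intro k hd hk
    have hklt : k < a.length := by omega
    rw [PySem.List.pyRange_one_cons (by exact_mod_cast hklt), List.drop_eq_getElem_cons hklt]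
    simp only [pvAScan, pvBLoop]
    have htn : ((k:Int)).toNat = k := by omega
    have hZk : Z.getD ((k:Int)).toNat 0 = pvZC (a.take (k+1)) := by rw [htn]; exact hZ k hklt
    have hUk : U.getD ((k:Int)).toNat 0 = (a.drop (k+1)).sum := by rw [htn]; exact hU k hklt
    have hzeros : (if a[k] = 0 then pvZC (a.take k) + 1 else pvZC (a.take k)) = pvZC (a.take (k+1)) :=
      (pv_zc_take_succ' a k hklt).symm
    have hseen : (a.take k).sum + a[k] = (a.take (k+1)).sum := by
      rw [List.sum_take_succ]
    have hcond : ((a.take (k+1)).sum + (a.drop (k+1)).sum = a.sum) := (pv_sum_split a (k+1)).symm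
    rw [hZk, hUk, hzeros, hseen]
    have hiff : (pvZC (a.take (k+1)) = (a.drop (k+1)).sum)
        ↔ (pvZC (a.take (k+1)) = a.sum - (a.take (k+1)).sum) := by omega
    by_cases hc : pvZC (a.take (k+1)) = (a.drop (k+1)).sum
    · rw [if_pos hc, if_pos (hiff.mp hc)]
    · rw [if_neg hc, if_neg (fun h => hc (hiff.mpr h))]
      have := ih (k+1) (by omega) (by omega)
      rw [show ((k+1:Nat):Int) = (k:Int)+1 by push_cast; ring] at this
      exact this

theorem pv_main_aux (a Z0 U0 : List Int) (hne : a ≠ [])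
    (hZlen : Z0.length = a.length) (h0 : Z0.getD 0 0 = pvZC (a.take 1))
    (hUlen : U0.length = a.length) :
    pvAScan ((PySem.List.pyRange 1 (a.length:Int) 1).foldl (pvZStep a) Z0)
      ((PySem.List.pyRange ((a.length:Int) - 2) (-1) (-1)).foldl (pvUStep a) (U0.set (a.length - 1) 0))
      (PySem.List.pyRange 0 (a.length:Int) 1) = pvBLoop a.sum a 0 0 0 := by
  have hn : 1 ≤ a.length := List.length_pos_of_ne_nil hne
  have hZchar := pv_Z_char a Z0 hZlen h0 a.length hn le_rfl
  set U1 : List Int := U0.set (a.length - 1) 0 with hU1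
  have hU1len : U1.length = a.length := by simp [hU1, hUlen]
  have hU1inv : ∀ i : Nat, a.length - 2 < i → i < a.length →
      U1.getD i 0 = (a.drop (i+1)).sum := by
    intro i h1 h2
    have hieq : i = a.length - 1 := by omega
    subst hieq
    rw [hU1, pv_getD_set_self _ _ _ _ (by omega)]
    rw [show a.length - 1 + 1 = a.length by omega, List.drop_length, List.sum_nil]
  have hUchar : ∀ i : Nat, i < a.length →
      ((PySem.List.pyRange ((a.length:Int) - 2) (-1) (-1)).foldl (pvUStep a) U1).getD i 0
        = (a.drop (i+1)).sum := by
    by_cases h2 : 2 ≤ a.length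
    · have hc : ((a.length:Int) - 2) = ((a.length - 2 : Nat) : Int) := by omega
      rw [hc]
      exact (pv_U_char a (a.length - 2) (by omega) U1 hU1len hU1inv).2
    · have hone : a.length = 1 := by omega
      rw [PySem.List.pyRange_neg_one_eq_nil (by omega), List.foldl_nil]
      intro i hi
      have hi0 : i = 0 := by omega
      subst hi0
      rw [hU1, show a.length - 1 = 0 by omega, pv_getD_set_self _ _ _ _ (by omega)]
      rw [List.drop_eq_nil_of_le (by omega), List.sum_nil]
  have hfin := pv_scan_eq a _ _ hZchar.2 hUchar a.length 0 (by omega) (by omega)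
  simpa [pvZC] using hfin

theorem Algoritmo_main (a : List Int) (h : a ≠ []) : Algoritmo a = Algoritmo_alt a := by
  obtain ⟨x, t, rfl⟩ := List.exists_cons_of_ne_nil h
  simp only [Algoritmo, Algoritmo_alt, PySem.List.pyGet?_zero_cons]
  by_cases hx : x = 0
  · rw [if_pos hx]
    apply pv_main_aux (x :: t) _ _ h
    · simp
    · rw [pv_getD_set_self _ _ _ _ (by simp)]
      simp [pvZC, hx]
    · simp
  · rw [if_neg hx]
    apply pv_main_aux (x :: t) _ _ h
    · simp
    · simp [pvZC, hx, List.getD_eq_getElem?_getD]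
    · simp

-- ===== VERDICT =====
theorem Algoritmo_spec : Claim_equal_Algoritmo := by
  intro a _ hp
  exact Algoritmo_main a hp

@[simp] theorem Algoritmo_raises : Claim_raises_Algoritmo := by
  unfold Claim_raises_Algoritmo
  exact ⟨fun a _ hr hp => hp hr, by decide⟩
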